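-- pv_equiv track=rewrite | github.com/LGMchili/DecapAllocation | run.py | findWhiteSpaceVertex
-- ===== SOURCE A (Python) =====
-- def findWhiteSpaceVertex(chip, modules):
--     whiteSpace = []
--     for v in chip:
--         whiteSpace.append(v)
--     for mdl in modules:
--         vertex = [mdl[0], mdl[1], (mdl[0][0], mdl[1][1]), (mdl[1][0], mdl[0][1])]
--         for v in vertex:
--             if(v not in whiteSpace):
--                 whiteSpace.append(v)
--             else:
--                 whiteSpace.remove(v)
--
--     whiteSpace = sorted(whiteSpace, key = lambda x: (x[1], -x[0]), reverse = True) # sort by cordinates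
--     return whiteSpace
-- ===== SOURCE B (Python) =====
-- def findWhiteSpaceVertex(chip, modules):
--     c0 = {}
--     for v in chip:
--         c0[v] = c0.get(v, 0) + 1
--     m = {}
--     for mdl in modules:
--         for v in (mdl[0], mdl[1], (mdl[0][0], mdl[1][1]), (mdl[1][0], mdl[0][1])):
--             m[v] = m.get(v, 0) + 1
--     out = []
--     for v in list(c0) + [v for v in m if v not in c0]:
--         c, k = c0.get(v, 0), m.get(v, 0)
--         n = c - k if k <= c else (k - c) % 2
--         out.extend([v] * n)
--     return sorted(out, key=lambda x: (x[1], -x[0]), reverse=True)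
-- ===== Notes on version B (the rewrite author's own statement) =====
-- stated objective: faster
-- what changed: A toggles each module corner against a growing list with linear membership tests and remove; B builds two frequency tables (chip counts, corner counts) and computes each distinct vertex's final multiplicity in closed form (c-m if m<=c, else (m-c)%2), then applies the same sort.
import Mathlib
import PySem

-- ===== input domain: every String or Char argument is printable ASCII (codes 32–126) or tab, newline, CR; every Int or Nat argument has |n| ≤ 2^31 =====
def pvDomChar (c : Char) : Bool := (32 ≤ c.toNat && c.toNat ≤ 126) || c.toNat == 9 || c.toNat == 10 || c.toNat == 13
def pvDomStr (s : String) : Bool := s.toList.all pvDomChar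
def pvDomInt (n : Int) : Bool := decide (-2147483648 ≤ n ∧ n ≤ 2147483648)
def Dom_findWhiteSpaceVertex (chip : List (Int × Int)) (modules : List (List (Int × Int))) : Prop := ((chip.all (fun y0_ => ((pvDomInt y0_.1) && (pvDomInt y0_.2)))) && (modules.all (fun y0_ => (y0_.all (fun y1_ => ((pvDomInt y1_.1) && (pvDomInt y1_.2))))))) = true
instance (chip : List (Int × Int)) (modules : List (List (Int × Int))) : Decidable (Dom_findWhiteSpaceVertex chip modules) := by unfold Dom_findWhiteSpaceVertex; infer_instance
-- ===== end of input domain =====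

-- B replaces A's quadratic sequential list-toggle (membership test + remove per corner) by two
-- frequency tables and a closed-form per-vertex multiplicity, then the same sort: faster (asymptotic).

-- ===== PORT A =====
-- corner extraction shared vocabulary: mdl[0], mdl[1], (mdl[0][0], mdl[1][1]), (mdl[1][0], mdl[0][1]);
-- pyGet? is none (IndexError) when the module has fewer than 2 vertices — excluded by Pre_ below.
def pvCorners (mdl : List (Int × Int)) : List (Int × Int) :=
  let a := (PySem.List.pyGet? mdl 0).getD (0, 0)
  let b := (PySem.List.pyGet? mdl 1).getD (0, 0)
  [a, b, (a.1, b.2), (b.1, a.2)]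

-- 'if v not in whiteSpace: append else remove' (remove = erase first occurrence, guaranteed present)
def pvToggle (ws : List (Int × Int)) (v : Int × Int) : List (Int × Int) :=
  if v ∈ ws then ws.erase v else ws ++ [v]

def findWhiteSpaceVertex (chip : List (Int × Int)) (modules : List (List (Int × Int))) : List (Int × Int) :=
  let ws := chip.foldl (fun acc v => acc ++ [v]) []
  let ws := modules.foldl (fun acc mdl => (pvCorners mdl).foldl pvToggle acc) ws
  PySem.List.sorted2 ws (fun x => x.2) (fun x => -x.1) true

-- ===== PORT B =====
def pvBump (d : PySem.Dict (Int × Int) Int) (v : Int × Int) : PySem.Dict (Int × Int) Int :=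
  d.insert v (d.getD v 0 + 1)

def findWhiteSpaceVertex_alt (chip : List (Int × Int)) (modules : List (List (Int × Int))) : List (Int × Int) :=
  let c0 := chip.foldl pvBump PySem.Dict.empty
  let m := modules.foldl (fun d mdl => (pvCorners mdl).foldl pvBump d) PySem.Dict.empty
  let keys := c0.keys ++ m.keys.filter (fun v => !(c0.contains v))
  let out := keys.foldl (fun acc v =>
    let c := c0.getD v 0
    let k := m.getD v 0
    let n := if k ≤ c then c - k else PySem.Int.mod (k - c) 2
    acc ++ List.replicate n.toNat v) []
  PySem.List.sorted2 out (fun x => x.2) (fun x => -x.1) true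

-- ===== PRECONDITION & SPEC =====
-- Pre_ excludes exactly the inputs on which A raises IndexError: a module with fewer than 2 vertices.
def Pre_findWhiteSpaceVertex (chip : List (Int × Int)) (modules : List (List (Int × Int))) : Prop :=
  ∀ mdl ∈ modules, 2 ≤ mdl.length
instance (chip : List (Int × Int)) (modules : List (List (Int × Int))) : Decidable (Pre_findWhiteSpaceVertex chip modules) := by unfold Pre_findWhiteSpaceVertex; infer_instance

def pvWitness_findWhiteSpaceVertex : (List (Int × Int)) × (List (List (Int × Int))) :=
  ([(0, 0), (2, 1)], [[(0, 0), (1, 1)], [(1, 1), (2, 2), (3, 3)]])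

def Spec_findWhiteSpaceVertex (chip : List (Int × Int)) (modules : List (List (Int × Int))) (out : List (Int × Int)) : Prop := out = findWhiteSpaceVertex_alt chip modules
instance (chip : List (Int × Int)) (modules : List (List (Int × Int))) (out : List (Int × Int)) : Decidable (Spec_findWhiteSpaceVertex chip modules out) := by unfold Spec_findWhiteSpaceVertex; infer_instance

-- ===== CLAIM (what is proved, stated in full; the proofs are below) =====
def Claim_equal_findWhiteSpaceVertex : Prop := ∀ (chip : List (Int × Int)) (modules : List (List (Int × Int))), Dom_findWhiteSpaceVertex chip modules → Pre_findWhiteSpaceVertex chip modules → Spec_findWhiteSpaceVertex chip modules (findWhiteSpaceVertex chip modules)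

-- ===== LEMMAS AND PROOFS =====

-- The two sort calls agree once the pre-sort lists are permutations of each other:
-- the tuple key (x[1], -x[0]) is injective, so Python's stable sort is determined by the multiset.
theorem pv_sorted2_eq_sorted_lex (xs : List (Int × Int)) :
    PySem.List.sorted2 xs (fun x => x.2) (fun x => -x.1) true
      = PySem.List.sorted xs (fun x => (toLex (x.2, -x.1) : Int ×ₗ Int)) true := by
  simp only [PySem.List.sorted2, PySem.List.sorted]
  congr 1
  funext acc x
  congr 1
  funext a b
  simp only [Prod.Lex.lt_iff]
  rcases lt_trichotomy a.2 b.2 with h | h | h <;>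
    simp [h, not_lt_of_gt] <;> omega

theorem pv_sorted_rev_congr_perm {α κ : Type} [LinearOrder κ] (key : α → κ)
    (hinj : Function.Injective key) {xs ys : List α} (h : xs.Perm ys) :
    PySem.List.sorted xs key true = PySem.List.sorted ys key true := by
  have p1 := PySem.List.sorted_perm xs key true
  have p2 := PySem.List.sorted_perm ys key true
  have q1 := PySem.List.sorted_pairwise_rev xs key
  have q2 := PySem.List.sorted_pairwise_rev ys key
  have hr : (PySem.List.sorted xs key true).reverse = (PySem.List.sorted ys key true).reverse := by
    apply PySem.List.eq_of_perm_of_pairwise_le_of_injective key hinj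
    · exact ((List.reverse_perm _).trans ((p1.trans h).trans p2.symm)).trans (List.reverse_perm _).symm
    · exact (List.pairwise_reverse).mpr q1
    · exact (List.pairwise_reverse).mpr q2
  simpa using congrArg List.reverse hr

-- the per-vertex toggle step on multiplicities
def pvStep (c : Nat) : Nat := if c = 0 then 1 else c - 1

theorem pvStep_iter (m c : Nat) : pvStep^[m] c = if m ≤ c then c - m else (m - c) % 2 := by
  induction m generalizing c with
  | zero => simp
  | succ m ih =>
    rw [Function.iterate_succ_apply, ih]
    by_cases hc : c = 0 <;> simp [pvStep, hc] <;> split_ifs <;> omega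

theorem pv_count_toggle (ws : List (Int × Int)) (w v : Int × Int) :
    (pvToggle ws w).count v = if w = v then pvStep (ws.count v) else ws.count v := by
  unfold pvToggle pvStep
  by_cases hm : w ∈ ws
  · simp only [hm, if_true]
    by_cases he : w = v
    · subst he
      have h1 : 1 ≤ ws.count w := List.count_pos_iff.mpr hm
      simp [List.count_erase_self]
      omega
    · simp [List.count_erase_of_ne (fun h => he h.symm), he]
  · simp only [hm, if_false, List.count_append]
    by_cases he : w = v
    · subst he
      have h0 : ws.count w = 0 := List.count_eq_zero.mpr hm
      simp [h0]
    · simp [he]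

theorem pv_count_foldl_toggle (vs ws : List (Int × Int)) (v : Int × Int) :
    (vs.foldl pvToggle ws).count v = pvStep^[vs.count v] (ws.count v) := by
  induction vs generalizing ws with
  | nil => simp
  | cons w vs ih =>
    simp only [List.foldl_cons, ih, pv_count_toggle]
    by_cases he : w = v
    · simp [he, Function.iterate_succ_apply]
    · simp [he]

-- nested per-module fold = fold over the flattened corner list
theorem pv_foldl_nested {β : Type} (f : β → (Int × Int) → β) (modules : List (List (Int × Int))) (init : β) :
    modules.foldl (fun acc mdl => (pvCorners mdl).foldl f acc) init
      = (modules.flatMap pvCorners).foldl f init := by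
  induction modules generalizing init with
  | nil => rfl
  | cons m ms ih => simp [List.flatMap_cons, List.foldl_append, ih]

theorem pv_count_flatMap_replicate (keys : List (Int × Int)) (hnd : keys.Nodup)
    (g : (Int × Int) → Nat) (u : Int × Int) :
    (keys.flatMap (fun v => List.replicate (g v) v)).count u
      = if u ∈ keys then g u else 0 := by
  induction keys with
  | nil => simp
  | cons k ks ih =>
    simp only [List.flatMap_cons, List.count_append, List.count_replicate,
      ih (List.Nodup.of_cons hnd), List.mem_cons]
    by_cases he : u = k
    · subst he
      have hn : u ∉ ks := (List.nodup_cons.mp hnd).1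
      simp [hn]
    · simp [he, Ne.symm he]

-- ===== VERDICT (by name: the statement is the Claim_ definition above) =====
theorem findWhiteSpaceVertex_spec : Claim_equal_findWhiteSpaceVertex := by
  intro chip modules _ _
  unfold Spec_findWhiteSpaceVertex findWhiteSpaceVertex findWhiteSpaceVertex_alt
  have hbump : pvBump = fun d x => d.insert x (d.getD x 0 + 1) := rfl
  simp only [hbump, pv_foldl_nested, PySem.List.foldl_append_singleton, List.nil_append,
    PySem.Dict.foldl_insert_getD_add_one_eq_counter, PySem.Dict.keys_counter,
    PySem.Dict.contains_counter, PySem.Dict.getD_counter,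
    PySem.List.foldl_append_eq_flatMap]
  rw [pv_sorted2_eq_sorted_lex, pv_sorted2_eq_sorted_lex]
  apply pv_sorted_rev_congr_perm
  · intro a b hab
    simp only [Prod.mk.injEq, toLex_inj] at hab
    exact Prod.ext (by omega) hab.1
  · rw [List.perm_iff_count]
    intro u
    have hnd : (PySem.Set.ofList chip ++
        List.filter (fun v => !chip.contains v)
          (PySem.Set.ofList (List.flatMap pvCorners modules))).Nodup := by
      refine List.Nodup.append (PySem.Set.nodup_ofList chip)
        ((PySem.Set.nodup_ofList _).filter _) ?_
      intro x hx1 hx2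
      have hx3 := (List.mem_filter.mp hx2).2
      simp only [Bool.not_eq_eq_eq_not, Bool.not_true, List.contains_eq_mem,
        decide_eq_false_iff_not] at hx3
      exact hx3 ((PySem.Set.mem_ofList chip x).mp hx1)
    rw [pv_count_foldl_toggle, pv_count_flatMap_replicate _ hnd, pvStep_iter]
    have hkeys : u ∈ (PySem.Set.ofList chip ++
        List.filter (fun v => !chip.contains v)
          (PySem.Set.ofList (List.flatMap pvCorners modules)))
        ↔ u ∈ chip ∨ u ∈ List.flatMap pvCorners modules := by
      simp only [List.mem_append, List.mem_filter, PySem.Set.mem_ofList,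
        Bool.not_eq_eq_eq_not, Bool.not_true, List.contains_eq_mem, decide_eq_false_iff_not]
      by_cases hc : u ∈ chip <;> simp [hc]
    by_cases hmem : u ∈ chip ∨ u ∈ List.flatMap pvCorners modules
    · rw [if_pos (hkeys.mpr hmem)]
      rw [PySem.Int.mod_eq_emod_of_pos (by norm_num)]
      split_ifs <;> omega
    · rw [if_neg (fun h => hmem (hkeys.mp h))]
      push Not at hmem
      rw [List.count_eq_zero.mpr hmem.1, List.count_eq_zero.mpr hmem.2]
      simp
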